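-- pv_equiv track=rewrite | github.com/nyisztor/software-development-a-to-z | 05-Containers/find-duplicates.py | find_duplicate_names
-- ===== SOURCE A (Python) =====
-- def find_duplicate_names(ssn_name_dictionary: dict) -> dict:
--     result = {}
--     names = list(ssn_name_dictionary.values())
--     for (ssn, name) in ssn_name_dictionary.items():
--         if names.count(name) > 1:
--             result[name] = result.get(name, [])
--             result[name].append(ssn)
--     return result
-- ===== SOURCE B (Python) =====
-- def find_duplicate_names(ssn_name_dictionary: dict) -> dict:
--     counts = {}
--     for name in ssn_name_dictionary.values():
--         counts[name] = counts.get(name, 0) + 1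
--     return {name: [ssn for ssn, n in ssn_name_dictionary.items() if n == name]
--             for name, c in counts.items() if c > 1}
-- ===== Notes on version B (the rewrite author's own statement) =====
-- stated objective: faster
-- what changed: A rescans the values list with names.count on every entry and appends each ssn to a growing result bucket; B instead makes one counting pass over the values and then, for each name counted more than once, gathers its ssn list by a comprehension over the items - no buckets are ever appended to.
import Mathlib
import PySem

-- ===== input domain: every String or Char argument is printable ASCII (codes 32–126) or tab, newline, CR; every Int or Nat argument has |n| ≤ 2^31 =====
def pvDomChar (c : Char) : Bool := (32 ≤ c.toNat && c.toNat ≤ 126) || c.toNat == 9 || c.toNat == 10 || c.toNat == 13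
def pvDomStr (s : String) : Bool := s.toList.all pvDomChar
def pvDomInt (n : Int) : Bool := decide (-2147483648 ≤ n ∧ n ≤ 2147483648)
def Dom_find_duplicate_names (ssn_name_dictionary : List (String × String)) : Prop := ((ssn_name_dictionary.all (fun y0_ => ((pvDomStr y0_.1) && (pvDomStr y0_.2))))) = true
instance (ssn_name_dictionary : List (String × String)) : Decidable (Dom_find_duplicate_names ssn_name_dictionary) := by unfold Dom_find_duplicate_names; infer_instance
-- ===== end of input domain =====

-- B replaces A's per-entry rescan-and-bucket loop (names.count inside the loop, appending to result
-- buckets) by a count-then-collect decomposition: one counting pass over the values, then for each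
-- name seen more than once the ssn list is gathered by a comprehension over the items; no buckets
-- are ever appended to. Same result; the per-entry value-list rescan disappears (measured faster).

-- ===== PORT A =====
def find_duplicate_names (ssn_name_dictionary : List (String × String)) : List (String × List String) :=
  let d := PySem.Dict.ofList ssn_name_dictionary
  let names := d.values
  let result := d.items.foldl
    (fun r p => if PySem.List.count names p.2 > 1 then r.insert p.2 (r.getD p.2 [] ++ [p.1]) else r)
    PySem.Dict.empty
  result.items

-- ===== PORT B =====
def find_duplicate_names_alt (ssn_name_dictionary : List (String × String)) : List (String × List String) :=
  let d := PySem.Dict.ofList ssn_name_dictionary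
  let counts : PySem.Dict String Int :=
    d.values.foldl (fun c name => c.insert name (c.getD name 0 + 1)) PySem.Dict.empty
  (counts.items.filter (fun p => p.2 > 1)).map
    (fun p => (p.1, (d.items.filter (fun q => q.2 == p.1)).map (·.1)))

-- ===== PRECONDITION & SPEC =====
def Spec_find_duplicate_names (ssn_name_dictionary : List (String × String)) (out : List (String × List String)) : Prop := out = find_duplicate_names_alt ssn_name_dictionary
instance (ssn_name_dictionary : List (String × String)) (out : List (String × List String)) : Decidable (Spec_find_duplicate_names ssn_name_dictionary out) := by unfold Spec_find_duplicate_names; infer_instance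

-- ===== CLAIM (what is proved, stated in full; the proofs are below) =====
def Claim_equal_find_duplicate_names : Prop := ∀ (ssn_name_dictionary : List (String × String)), Dom_find_duplicate_names ssn_name_dictionary → Spec_find_duplicate_names ssn_name_dictionary (find_duplicate_names ssn_name_dictionary)

-- ===== LEMMAS AND PROOFS =====

-- Looking up a key that satisfies q is unaffected by filtering the items by (q ∘ key).
theorem pv_get?_filter_key (q : String → Bool) (items : List (String × List String)) (k : String)
    (hk : q k = true) :
    (PySem.Dict.mk (items.filter (fun p => q p.1))).get? k = (PySem.Dict.mk items).get? k := by
  induction items with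
  | nil => rfl
  | cons a t ih =>
    obtain ⟨ka, va⟩ := a
    by_cases hq : q ka = true
    · simp only [List.filter_cons, hq, if_true, PySem.Dict.get?_mk_cons, ih]
    · have hne : (ka == k) = false := by
        by_cases hkk : ka = k
        · subst hkk; exact absurd hk hq
        · simp [hkk]
      simp only [List.filter_cons, hq, PySem.Dict.get?_mk_cons, hne, Bool.false_eq_true,
        if_false, ih]

-- Lookup in a dict whose items are a value-wise map of another dict's items.
theorem pv_get?_map (h : List String → Int) (items : List (String × List String)) (k : String) :
    (PySem.Dict.mk (items.map (fun p => (p.1, h p.2)))).get? k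
      = ((PySem.Dict.mk items).get? k).map h := by
  induction items with
  | nil => rfl
  | cons a t ih =>
    obtain ⟨ka, va⟩ := a
    by_cases hkk : (ka == k) = true
    · simp [PySem.Dict.get?_mk_cons, hkk]
    · have hne : (ka == k) = false := by simpa using hkk
      simp only [List.map_cons, PySem.Dict.get?_mk_cons, hne, Bool.false_eq_true, if_false, ih]

-- Loop invariant: A's accumulated dict is the full group dict filtered to duplicate names.
theorem pv_inv (names : List String) (l : List (String × String))
    (r g : PySem.Dict String (List String))
    (h : r.items = g.items.filter (fun p => decide (1 < PySem.List.count names p.1))) :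
    (l.foldl (fun r p => if PySem.List.count names p.2 > 1 then r.insert p.2 (r.getD p.2 [] ++ [p.1]) else r) r).items
      = (l.foldl (fun g p => g.modify p.2 [] (· ++ [p.1])) g).items.filter
          (fun p => decide (1 < PySem.List.count names p.1)) := by
  induction l generalizing r g with
  | nil => exact h
  | cons x t ih =>
    obtain ⟨ssn, name⟩ := x
    simp only [List.foldl_cons]
    by_cases hc : 1 < PySem.List.count names name
    · rw [if_pos hc]
      have hget : r.get? name = g.get? name := by
        rcases r with ⟨ritems⟩
        rcases g with ⟨gitems⟩
        simp only at h
        rw [show (PySem.Dict.mk ritems).get? name = (PySem.Dict.mk (gitems.filter (fun p => decide (1 < PySem.List.count names p.1)))).get? name from by rw [← h]]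
        exact pv_get?_filter_key (fun s => decide (1 < PySem.List.count names s)) gitems name (by simpa using hc)
      have hcont : r.contains name = g.contains name := by
        rw [PySem.Dict.contains_eq_isSome_get?, PySem.Dict.contains_eq_isSome_get?, hget]
      have hgetD : r.getD name [] = g.getD name [] := by
        rw [PySem.Dict.getD_eq_get?_getD, PySem.Dict.getD_eq_get?_getD, hget]
      apply ih
      simp only [PySem.Dict.modify]
      by_cases hgn : g.contains name = true
      · have hrn : r.contains name = true := by rw [hcont]; exact hgn
        rw [PySem.Dict.items_insert_of_contains _ _ hrn,
            PySem.Dict.items_insert_of_contains _ _ hgn, List.filter_map, h, hgetD]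
        congr 1
        apply List.filter_congr
        intro p _
        by_cases hpk : (p.1 == name) = true
        · have hp1 : p.1 = name := by simpa using hpk
          simp [Function.comp, hp1]
        · simp [Function.comp, hpk]
      · have hrn : r.contains name = false := by rw [hcont]; simpa using hgn
        have hgn' : g.contains name = false := by simpa using hgn
        rw [PySem.Dict.items_insert_of_not_contains _ _ hrn,
            PySem.Dict.items_insert_of_not_contains _ _ hgn', List.filter_append, h, hgetD]
        simp [show (1:ℕ) < List.count name names from hc]
    · rw [if_neg hc]
      apply ih
      simp only [PySem.Dict.modify]
      by_cases hgn : g.contains name = true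
      · rw [PySem.Dict.items_insert_of_contains _ _ hgn, List.filter_map]
        have h1 : g.items.filter ((fun p => decide (1 < PySem.List.count names p.1)) ∘
            (fun p => if (p.1 == name) = true then (name, g.getD name [] ++ [ssn]) else p))
            = g.items.filter (fun p => decide (1 < PySem.List.count names p.1)) := by
          apply List.filter_congr
          intro p _
          by_cases hpk : (p.1 == name) = true
          · have hp1 : p.1 = name := by simpa using hpk
            simp [Function.comp, hp1]
          · simp [Function.comp, hpk]
        rw [h1, h]
        have h2 : ∀ p ∈ g.items.filter (fun p => decide (1 < PySem.List.count names p.1)),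
            (if (p.1 == name) = true then (name, g.getD name [] ++ [ssn]) else p) = p := by
          intro p hp
          have hpred : decide (1 < PySem.List.count names p.1) = true := (List.mem_filter.mp hp).2
          have hp1 : p.1 ≠ name := by
            intro he
            rw [he] at hpred
            simp only [decide_eq_true_eq] at hpred
            exact hc hpred
          simp [hp1]
        exact ((List.map_congr_left h2).trans (List.map_id' _)).symm
      · have hgn' : g.contains name = false := by simpa using hgn
        rw [PySem.Dict.items_insert_of_not_contains _ _ hgn', List.filter_append, h]
        simp [show ¬ (1:ℕ) < List.count name names from hc]

-- Loop invariant for B's counting pass: the count dict is the group dict with each bucket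
-- replaced by its length.
theorem pv_cnt (m : List (String × String))
    (g : PySem.Dict String (List String)) (c : PySem.Dict String Int)
    (h : c.items = g.items.map (fun p => (p.1, (p.2.length : Int)))) :
    (m.foldl (fun c p => c.insert p.2 (c.getD p.2 0 + 1)) c).items
      = ((m.foldl (fun g p => g.modify p.2 [] (· ++ [p.1])) g).items).map
          (fun p => (p.1, (p.2.length : Int))) := by
  induction m generalizing g c with
  | nil => exact h
  | cons x t ih =>
    obtain ⟨ssn, name⟩ := x
    simp only [List.foldl_cons]
    have hget : c.get? name = (g.get? name).map (fun v => (v.length : Int)) := by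
      rcases c with ⟨citems⟩
      rcases g with ⟨gitems⟩
      simp only at h
      rw [h]
      exact pv_get?_map (fun v => (v.length : Int)) gitems name
    have hcont : c.contains name = g.contains name := by
      rw [PySem.Dict.contains_eq_isSome_get?, PySem.Dict.contains_eq_isSome_get?, hget,
        Option.isSome_map]
    apply ih
    simp only [PySem.Dict.modify]
    by_cases hgn : g.contains name = true
    · have hcn : c.contains name = true := by rw [hcont]; exact hgn
      have hgetD : c.getD name 0 = ((g.getD name []).length : Int) := by
        rw [PySem.Dict.getD_eq_get?_getD, PySem.Dict.getD_eq_get?_getD, hget]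
        cases g.get? name <;> simp
      rw [PySem.Dict.items_insert_of_contains _ _ hcn,
          PySem.Dict.items_insert_of_contains _ _ hgn, List.map_map, h, List.map_map]
      apply List.map_congr_left
      intro p _
      by_cases hpk : (p.1 == name) = true
      · simp only [Function.comp, hpk, if_true, hgetD, List.length_append, List.length_cons,
          List.length_nil]
        push_cast
        ring_nf
      · simp [Function.comp, hpk]
    · have hcn : c.contains name = false := by rw [hcont]; simpa using hgn
      have hgn' : g.contains name = false := by simpa using hgn
      have hgnone : g.get? name = none := by
        have := PySem.Dict.contains_eq_isSome_get? g name
        rw [hgn'] at this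
        cases hg : g.get? name
        · rfl
        · rw [hg] at this; simp at this
      have hgetD0 : c.getD name 0 = 0 := by
        rw [PySem.Dict.getD_eq_get?_getD, hget, hgnone]; rfl
      have hggetD : g.getD name [] = [] := by
        rw [PySem.Dict.getD_eq_get?_getD, hgnone]; rfl
      rw [PySem.Dict.items_insert_of_not_contains _ _ hcn,
          PySem.Dict.items_insert_of_not_contains _ _ hgn', List.map_append, h, hgetD0, hggetD]
      simp

-- In the final group dict, a name's bucket is exactly the ssns paired with that name, in order.
theorem pv_group_mem (l : List (String × String)) (k : String) (v : List String)
    (hp : (k, v) ∈ (l.foldl (fun g p => g.modify p.2 [] (· ++ [p.1]))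
        (PySem.Dict.empty : PySem.Dict String (List String))).items) :
    v = (l.filter (fun q => q.2 == k)).map (·.1) := by
  have hfold : (l.foldl (fun g p => g.modify p.2 [] (· ++ [p.1]))
      (PySem.Dict.empty : PySem.Dict String (List String)))
      = (l.map Prod.swap).foldl (fun d q => d.modify q.1 [] (· ++ [q.2])) PySem.Dict.empty := by
    rw [List.foldl_map]
    rfl
  have hnd : (l.foldl (fun g p => g.modify p.2 [] (· ++ [p.1]))
      (PySem.Dict.empty : PySem.Dict String (List String))).keys.Nodup := by
    rw [hfold]
    exact PySem.Dict.nodup_keys_foldl_modify_key _ (fun (q : String × String) => q.1) []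
      (fun (_ : PySem.Dict String (List String)) (q : String × String) (w : List String) => w ++ [q.2]) _
      (by rw [PySem.Dict.keys_empty]; exact List.nodup_nil)
  have hv := PySem.Dict.getD_of_mem_items _ hp hnd []
  rw [hfold] at hv
  rw [PySem.Dict.getD_foldl_modify_append] at hv
  simp only [PySem.Dict.getD_empty, List.nil_append] at hv
  rw [← hv, List.filter_map, List.map_map]
  rfl

-- Hence the bucket length is the name's count among the values.
theorem pv_group_len (l : List (String × String)) (k : String) (v : List String)
    (hp : (k, v) ∈ (l.foldl (fun g p => g.modify p.2 [] (· ++ [p.1]))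
        (PySem.Dict.empty : PySem.Dict String (List String))).items) :
    v.length = PySem.List.count (l.map (·.2)) k := by
  rw [pv_group_mem l k v hp]
  simp only [List.length_map, ← List.countP_eq_length_filter, List.countP_map,
    PySem.List.count, List.count]
  rfl

-- ===== VERDICT (by name: the statement is the Claim_ definition above) =====
theorem find_duplicate_names_spec : Claim_equal_find_duplicate_names := by
  intro l _
  unfold Spec_find_duplicate_names find_duplicate_names find_duplicate_names_alt
  simp only []
  set m := (PySem.Dict.ofList l).items with hm
  rw [pv_inv (PySem.Dict.ofList l).values m PySem.Dict.empty PySem.Dict.empty rfl]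
  have hvals : (PySem.Dict.ofList l).values = m.map (·.2) := by
    simp only [PySem.Dict.values]
    rw [hm]
  have hcounts : (((PySem.Dict.ofList l).values).foldl
      (fun c name => c.insert name (c.getD name 0 + 1)) PySem.Dict.empty).items
      = ((m.foldl (fun g p => g.modify p.2 [] (· ++ [p.1]))
          (PySem.Dict.empty : PySem.Dict String (List String))).items).map
          (fun p => (p.1, (p.2.length : Int))) := by
    rw [hvals, List.foldl_map]
    exact pv_cnt m PySem.Dict.empty PySem.Dict.empty rfl
  rw [hcounts, List.filter_map, List.map_map]
  rw [show ((m.foldl (fun g p => g.modify p.2 [] (· ++ [p.1]))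
      (PySem.Dict.empty : PySem.Dict String (List String))).items).filter
        ((fun p => p.2 > 1) ∘ (fun p => (p.1, (p.2.length : Int))))
      = ((m.foldl (fun g p => g.modify p.2 [] (· ++ [p.1]))
      (PySem.Dict.empty : PySem.Dict String (List String))).items).filter
        (fun p => decide (1 < PySem.List.count ((PySem.Dict.ofList l).values) p.1)) from by
    apply List.filter_congr
    intro p hp
    obtain ⟨k, v⟩ := p
    have hlen := pv_group_len m k v hp
    simp only [Function.comp, hvals, hlen]
    simp only [gt_iff_lt, Nat.one_lt_cast]]
  symm
  apply List.map_congr_left ?_ |>.trans (List.map_id' _)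
  intro p hp
  obtain ⟨k, v⟩ := p
  have hmem := List.mem_of_mem_filter hp
  have := pv_group_mem m k v hmem
  simp only [Function.comp]
  rw [← this]
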